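-- pv_equiv track=rewrite | github.com/narpfel/adventofcode | 2015/11/solution.py | has_overlapping_equal_pairs
-- ===== SOURCE A (Python) =====
-- from itertools import tee
--
-- def advance(iterable, steps):
--     for _ in range(steps):
--         next(iterable, None)
--
-- def nwise(iterable, n=2):
--     iterables = tee(iterable, n)
--     for steps, iterable in enumerate(iterables):
--         advance(iterable, steps)
--     return zip(*iterables)
--
-- def has_overlapping_equal_pairs(s):
--     equal_pairs = 0
--     pairs = nwise(s)
--     for a, b in pairs:
--         if a == b:
--             equal_pairs += 1
--             next(pairs, None)
--     return equal_pairs >= 2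
-- ===== SOURCE B (Python) =====
-- def _has_adjacent_double(chars):
--     # True iff some adjacent pair of equal characters remains
--     while len(chars) >= 2:
--         if chars[0] == chars[1]:
--             return True
--         chars = chars[1:]
--     return False
--
-- def has_overlapping_equal_pairs(s):
--     # find the FIRST doubled position; then any later, disjoint double suffices
--     chars = list(s)
--     while len(chars) >= 2:
--         if chars[0] == chars[1]:
--             return _has_adjacent_double(chars[2:])
--         chars = chars[1:]
--     return False
-- ===== Notes on version B (the rewrite author's own statement) =====
-- stated objective: alternative
-- what changed: A greedily counts non-overlapping adjacent equal pairs with an iterator skip and tests count >= 2; B instead finds the FIRST doubled position and then just checks whether any later disjoint double exists, returning a boolean directly with no counter.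
import Mathlib
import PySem

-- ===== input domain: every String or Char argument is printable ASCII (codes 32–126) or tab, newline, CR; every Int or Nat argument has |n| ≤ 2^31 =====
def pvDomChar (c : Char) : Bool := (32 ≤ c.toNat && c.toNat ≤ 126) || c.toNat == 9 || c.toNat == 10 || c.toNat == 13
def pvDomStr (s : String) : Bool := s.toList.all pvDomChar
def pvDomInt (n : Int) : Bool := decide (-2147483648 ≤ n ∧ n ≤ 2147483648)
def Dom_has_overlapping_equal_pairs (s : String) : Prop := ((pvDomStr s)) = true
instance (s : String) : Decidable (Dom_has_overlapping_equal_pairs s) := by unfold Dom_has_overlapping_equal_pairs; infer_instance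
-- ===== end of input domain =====

-- B replaces A's greedy pair-count with "first double, then any later disjoint double" (alternative, same cost).

-- ===== PORT A =====
-- A's loop over nwise(s) with the iterator skip after a match: pair (a,b) at the
-- head; on a == b count and skip the next (overlapping) pair, i.e. drop both chars.
def pvGoA : List Char → Int → Int
  | a :: b :: t, c => if a == b then pvGoA t (c + 1) else pvGoA (b :: t) c
  | _, c => c

def has_overlapping_equal_pairs (s : String) : Bool :=
  decide (2 ≤ pvGoA s.toList 0)

-- ===== PORT B =====
-- Source B's _has_adjacent_double: slide chars = chars[1:] until a double is at the front
def pvHasDouble : List Char → Bool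
  | a :: b :: t => if a == b then true else pvHasDouble (b :: t)
  | _ => false

-- Source B's main loop: find the first double, then test chars[2:]
def pvGoB : List Char → Bool
  | a :: b :: t => if a == b then pvHasDouble t else pvGoB (b :: t)
  | _ => false

def has_overlapping_equal_pairs_alt (s : String) : Bool :=
  pvGoB s.toList

-- ===== PRECONDITION & SPEC =====
def Spec_has_overlapping_equal_pairs (s : String) (out : Bool) : Prop := out = has_overlapping_equal_pairs_alt s
instance (s : String) (out : Bool) : Decidable (Spec_has_overlapping_equal_pairs s out) := by unfold Spec_has_overlapping_equal_pairs; infer_instance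

-- ===== CLAIM (what is proved, stated in full; the proofs are below) =====
def Claim_equal_has_overlapping_equal_pairs : Prop := ∀ (s : String), Dom_has_overlapping_equal_pairs s → Spec_has_overlapping_equal_pairs s (has_overlapping_equal_pairs s)

-- ===== LEMMAS AND PROOFS =====

theorem pvGoA_nonneg : ∀ (l : List Char) (c : Int), 0 ≤ c → 0 ≤ pvGoA l c
  | a :: b :: t, c, h => by
    by_cases hab : a == b <;> simp only [pvGoA, hab, if_true]
    · exact pvGoA_nonneg t (c + 1) (by omega)
    · exact pvGoA_nonneg (b :: t) c h
  | [], c, h => h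
  | [_], c, h => h

theorem pvGoA_acc : ∀ (l : List Char) (c : Int), pvGoA l c = c + pvGoA l 0
  | a :: b :: t, c => by
    by_cases hab : a == b <;> simp only [pvGoA, hab, if_true]
    · rw [pvGoA_acc t (c + 1), pvGoA_acc t (0 + 1)]; ring
    · exact pvGoA_acc (b :: t) c
  | [], c => by simp [pvGoA]
  | [_], c => by simp [pvGoA]

theorem pvHasDouble_iff : ∀ (l : List Char), pvHasDouble l = true ↔ 1 ≤ pvGoA l 0
  | a :: b :: t => by
    by_cases hab : a == b <;>
      simp only [pvHasDouble, pvGoA, hab, if_true]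
    · have := pvGoA_nonneg t 0 le_rfl
      rw [pvGoA_acc t (0 + 1)]
      constructor <;> intro _ <;> first | omega | trivial
    · exact pvHasDouble_iff (b :: t)
  | [] => by simp [pvHasDouble, pvGoA]
  | [_] => by simp [pvHasDouble, pvGoA]

theorem pvGoB_iff : ∀ (l : List Char), pvGoB l = true ↔ 2 ≤ pvGoA l 0
  | a :: b :: t => by
    by_cases hab : a == b <;>
      simp only [pvGoB, pvGoA, hab, if_true]
    · rw [pvGoA_acc t (0 + 1), pvHasDouble_iff t]; omega
    · exact pvGoB_iff (b :: t)
  | [] => by simp [pvGoB, pvGoA]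
  | [_] => by simp [pvGoB, pvGoA]

-- ===== VERDICT (by name: the statement is the Claim_ definition above) =====
theorem has_overlapping_equal_pairs_spec : Claim_equal_has_overlapping_equal_pairs := by
  intro s _
  unfold Spec_has_overlapping_equal_pairs has_overlapping_equal_pairs has_overlapping_equal_pairs_alt
  rcases h : pvGoB s.toList with _ | _
  · simp only [decide_eq_false_iff_not]
    intro h2
    exact absurd ((pvGoB_iff s.toList).mpr h2) (by simp [h])
  · simp [(pvGoB_iff s.toList).mp h]
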